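-- pv_equiv track=rewrite | github.com/chrys5/word_hunt_tools | src/format_wordset.py | format_wordset
-- ===== SOURCE A (Python) =====
-- def subdivide(wset):
--     output = ""
--     subsets = {}
--
--     max_word_len = len(wset[0])
--     n = 3 # minimum length for a valid word in Word Hunt
--     while n <= max_word_len:
--         subsets[n] = [w for w in wset if len(w) == n]
--         n += 1
--     return subsets
--
-- def format_words(words, line_length=90):
--     output = ""
--
--     word_len = len(words[0])
--     tabs_needed = int(word_len / 8)
--     if word_len < 8:
--         delimeter_len = 8 - word_len
--     else:
--         delimeter_len = tabs_needed * 8 - word_len % 8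
--     words_per_line = int(line_length / (word_len + delimeter_len))
--     words_per_line += int((line_length % ((tabs_needed+1)*8)) / word_len)
--
--     for i in range(0, len(words), words_per_line):
--         output += '\t'.join(words[i:min(i+words_per_line, len(words))])
--         output += '\n'
--
--     return output
--
-- def format_wordset(wset):
--     output = ""
--
--     subsets = subdivide(wset)
--     n = 3
--     while n <= max(subsets, key=int):
--         output += "\n"
--         output += str(n) + "-letter words (" + str(len(subsets[n])) + "):\n"
--         output += format_words(subsets[n])
--         n += 1
--
--     return output
-- ===== SOURCE B (Python) =====
-- def _words_per_line(n):
--     # closed form of A's tab-delimiter computation, for word length n >= 3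
--     if n < 8:
--         return 90 // 8
--     t = n // 8
--     return 90 // (16 * t) + 90 % (8 * (t + 1)) // n
--
-- def format_wordset(wset):
--     m = len(wset[0])
--     buckets = {n: [] for n in range(3, m + 1)}
--     top = max(buckets)  # largest valid word length (ValueError if there is none)
--     for w in wset:
--         if 3 <= len(w) <= m:
--             buckets[len(w)].append(w)
--     parts = []
--     for n in range(3, top + 1):
--         words = buckets[n]
--         wpl = _words_per_line(n)
--         parts.append("\n%d-letter words (%d):\n" % (n, len(words)))
--         for i in range(0, len(words), wpl):
--             parts.append("\t".join(words[i:i + wpl]))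
--             parts.append("\n")
--     return "".join(parts)
-- ===== Notes on version B (the rewrite author's own statement) =====
-- stated objective: alternative
-- what changed: subdivide's one filter scan of the whole word list per length (plus re-computing max(subsets) on every loop test) is replaced by a single bucketing pass into pre-initialized per-length lists, the per-bucket tab/delimiter arithmetic by a closed-form words-per-line helper, and += string building by a parts list joined once (measured ~1.4x at the largest size, below the 1.5x bar, so no speed is claimed).
-- crash fix: When wset is nonempty, 3 <= len(wset[0]) <= 47, and some length between 3 and len(wset[0]) has no word of that length, A raises IndexError on words[0] in format_words while B returns the naturally formatted output (a section headed 'n-letter words (0):'). — e.g. on format_wordset(["abcd"]): A raises IndexError, B returns "\n3-letter words (0):\n\n4-letter words (1):\nabcd\n"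
import Mathlib
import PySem

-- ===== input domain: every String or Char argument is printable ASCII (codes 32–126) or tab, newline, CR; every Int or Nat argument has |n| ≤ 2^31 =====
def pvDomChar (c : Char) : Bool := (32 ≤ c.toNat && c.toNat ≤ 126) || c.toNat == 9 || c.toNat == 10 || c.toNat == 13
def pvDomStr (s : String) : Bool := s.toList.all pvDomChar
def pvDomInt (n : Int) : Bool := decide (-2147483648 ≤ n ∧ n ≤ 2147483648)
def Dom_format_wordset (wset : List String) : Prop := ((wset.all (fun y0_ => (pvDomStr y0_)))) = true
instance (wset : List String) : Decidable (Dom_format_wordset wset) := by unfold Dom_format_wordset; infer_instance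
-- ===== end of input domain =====

-- B replaces subdivide's one-filter-scan-per-length and the += string building by a single
-- bucketing pass over the words, a closed-form words-per-line formula, and a parts-list join.

-- ===== PORT A =====
-- while loops counting n = 3, 4, …, max are ported as folds over PySem.List.pyRange.
-- wset[0] / words[0] raise IndexError on an empty list; Pre_ excludes those inputs, so the
-- total rendering via List.headD "" is only ever used where the list is nonempty.
def subdivide (wset : List String) : PySem.Dict Int (List String) :=
  let max_word_len : Int := PySem.Str.len (wset.headD "")   -- len(wset[0])
  (PySem.List.pyRange 3 (max_word_len + 1) 1).foldl
    (fun subsets n => subsets.insert n (wset.filter (fun w => PySem.Str.len w == n)))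
    PySem.Dict.empty

-- int(x / 8) on a nonnegative int x is exactly floor division (exact here: word lengths ≥ 0).
def format_words (words : List String) (line_length : Int) : String :=
  let word_len : Int := PySem.Str.len (words.headD "")      -- len(words[0])
  let tabs_needed : Int := PySem.Int.floordiv word_len 8
  let delimeter_len : Int :=
    if word_len < 8 then 8 - word_len
    else tabs_needed * 8 - PySem.Int.mod word_len 8
  let words_per_line : Int :=
    PySem.Int.floordiv line_length (word_len + delimeter_len)
      + PySem.Int.floordiv (PySem.Int.mod line_length ((tabs_needed + 1) * 8)) word_len
  (PySem.List.pyRange 0 (PySem.List.len words) words_per_line).foldl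
    (fun output i =>
      (output ++ PySem.Str.join "\t"
          (PySem.List.slice words (some i) (some (min (i + words_per_line) (PySem.List.len words)))))
        ++ "\n")
    ""

-- max(subsets, key=int) is the maximum of the dict's keys (key=int is the identity on ints);
-- Pre_ guarantees the dict is nonempty, so the .getD 0 default is never the value used.
def format_wordset (wset : List String) : String :=
  let subsets := subdivide wset
  let mx : Int := (PySem.List.max? subsets.keys (fun k => k)).getD 0
  (PySem.List.pyRange 3 (mx + 1) 1).foldl
    (fun output n =>
      ((output ++ "\n")
          ++ (PySem.Int.toStr n ++ "-letter words (" ++ PySem.Int.toStr (PySem.List.len (subsets.getD n [])) ++ "):\n"))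
        ++ format_words (subsets.getD n []) 90)
    ""

-- ===== PORT B =====
def wplAlt (n : Int) : Int :=
  if n < 8 then PySem.Int.floordiv 90 8
  else
    let t := PySem.Int.floordiv n 8
    PySem.Int.floordiv 90 (16 * t) + PySem.Int.floordiv (PySem.Int.mod 90 (8 * (t + 1))) n

-- B's dict comprehension {n: [] for n in range(3, m+1)}
def bucketsInit (wset : List String) : PySem.Dict Int (List String) :=
  let m : Int := PySem.Str.len (wset.headD "")
  (PySem.List.pyRange 3 (m + 1) 1).foldl (fun d n => d.insert n ([] : List String)) PySem.Dict.empty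

-- B's single bucketing pass over the words
def bucketsAlt (wset : List String) : PySem.Dict Int (List String) :=
  let m : Int := PySem.Str.len (wset.headD "")
  wset.foldl
    (fun d w =>
      if 3 ≤ PySem.Str.len w ∧ PySem.Str.len w ≤ m
      then d.modify (PySem.Str.len w) [] (fun l => l ++ [w])
      else d)
    (bucketsInit wset)

-- top = max(buckets) is the maximum of the dict's keys (ValueError when it is empty);
-- Pre_ guarantees it is nonempty, so the .getD 0 default is never the value used.
def format_wordset_alt (wset : List String) : String :=
  let top : Int := (PySem.List.max? (bucketsInit wset).keys (fun k => k)).getD 0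
  let buckets := bucketsAlt wset
  let parts :=
    (PySem.List.pyRange 3 (top + 1) 1).foldl
      (fun parts n =>
        let words := buckets.getD n []
        let wpl := wplAlt n
        let parts := parts ++
          ["\n" ++ PySem.Int.toStr n ++ "-letter words (" ++ PySem.Int.toStr (PySem.List.len words) ++ "):\n"]
        (PySem.List.pyRange 0 (PySem.List.len words) wpl).foldl
          (fun parts i =>
            (parts ++ [PySem.Str.join "\t" (PySem.List.slice words (some i) (some (i + wpl)))]) ++ ["\n"])
          parts)
      []
  PySem.Str.join "" parts

-- ===== PRECONDITION & SPEC =====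
-- Pre_ is exactly where the Python A returns: wset nonempty (else IndexError on wset[0]),
-- 3 ≤ len(wset[0]) (else ValueError from max over an empty dict), len(wset[0]) ≤ 47 (at
-- length 48 A's words_per_line is 0 and range(0, len, 0) raises ValueError), and every
-- length 3..len(wset[0]) has a word (else IndexError on words[0] in format_words).
def Pre_format_wordset (wset : List String) : Prop :=
  wset ≠ [] ∧ 3 ≤ PySem.Str.len (wset.headD "") ∧ PySem.Str.len (wset.headD "") ≤ 47 ∧
    ∀ n ∈ PySem.List.pyRange 3 (PySem.Str.len (wset.headD "") + 1) 1,
      ∃ w ∈ wset, PySem.Str.len w = n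
instance (wset : List String) : Decidable (Pre_format_wordset wset) := by
  unfold Pre_format_wordset; infer_instance

def pvWitness_format_wordset : List String := ["abc"]

-- When wset is nonempty, 3 ≤ len(wset[0]) ≤ 47, and some length between 3 and len(wset[0])
-- has no word of that length, A raises IndexError on words[0] in format_words while B
-- returns the naturally formatted output (a section headed "n-letter words (0):").
def Raises_format_wordset (wset : List String) : Prop :=
  wset ≠ [] ∧ 3 ≤ PySem.Str.len (wset.headD "") ∧ PySem.Str.len (wset.headD "") ≤ 47 ∧
    ∃ n ∈ PySem.List.pyRange 3 (PySem.Str.len (wset.headD "") + 1) 1,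
      ∀ w ∈ wset, PySem.Str.len w ≠ n
instance (wset : List String) : Decidable (Raises_format_wordset wset) := by
  unfold Raises_format_wordset; infer_instance

def pvRaiseWitness_format_wordset : List String := ["abcd"]
def pvRaiseWitnessOut_format_wordset : String :=
  "\n3-letter words (0):\n\n4-letter words (1):\nabcd\n"

def Spec_format_wordset (wset : List String) (out : String) : Prop := out = format_wordset_alt wset
instance (wset : List String) (out : String) : Decidable (Spec_format_wordset wset out) := by
  unfold Spec_format_wordset; infer_instance

-- ===== CLAIM (what is proved, stated in full; the proofs are below) =====
def Claim_equal_format_wordset : Prop := ∀ (wset : List String), Dom_format_wordset wset → Pre_format_wordset wset → Spec_format_wordset wset (format_wordset wset)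

def Claim_raises_format_wordset : Prop := (∀ (wset : List String), Dom_format_wordset wset → Raises_format_wordset wset → ¬ Pre_format_wordset wset) ∧ (Dom_format_wordset (pvRaiseWitness_format_wordset) ∧ Raises_format_wordset (pvRaiseWitness_format_wordset) ∧ format_wordset_alt (pvRaiseWitness_format_wordset) = pvRaiseWitnessOut_format_wordset)


-- ===== LEMMAS AND PROOFS =====

-- string append associativity / join over the empty separator, via toList
theorem sappend_assoc (a b c : String) : (a ++ b) ++ c = a ++ (b ++ c) := by
  rw [← String.toList_inj]; simp

theorem join_empty_nil : PySem.Str.join "" [] = "" := by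
  rw [← String.toList_inj]; simp [PySem.Str.toList_join, PySem.Chars.join_nil]

theorem join_empty_cons (p : String) (ps : List String) :
    PySem.Str.join "" (p :: ps) = p ++ PySem.Str.join "" ps := by
  rw [← String.toList_inj]
  cases ps with
  | nil => simp [PySem.Str.toList_join, PySem.Chars.join_singleton, PySem.Chars.join_nil]
  | cons q r => simp [PySem.Str.toList_join, PySem.Chars.join_cons_cons]

theorem join_empty_append (l1 l2 : List String) :
    PySem.Str.join "" (l1 ++ l2) = PySem.Str.join "" l1 ++ PySem.Str.join "" l2 := by
  induction l1 with
  | nil => rw [← String.toList_inj]; simp [join_empty_nil]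
  | cons p ps ih =>
      simp only [List.cons_append, join_empty_cons, ih, sappend_assoc]

theorem foldl_strcat {α : Type} (f : α → String) (l : List α) : ∀ (acc : String),
    l.foldl (fun o x => o ++ f x) acc = acc ++ PySem.Str.join "" (l.map f) := by
  induction l with
  | nil => intro acc; rw [← String.toList_inj]; simp [join_empty_nil]
  | cons x xs ih =>
      intro acc
      simp only [List.foldl_cons, ih, List.map_cons, join_empty_cons, sappend_assoc]

theorem join_empty_flatMap {α : Type} (g : α → List String) (l : List α) :
    PySem.Str.join "" (l.flatMap g) =
      PySem.Str.join "" (l.map (fun x => PySem.Str.join "" (g x))) := by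
  induction l with
  | nil => simp
  | cons x xs ih =>
      simp only [List.flatMap_cons, List.map_cons, join_empty_append, join_empty_cons, ih]

theorem join_empty_pair_cons (a b : String) (ps : List String) :
    PySem.Str.join "" (a :: b :: ps) = (a ++ b) ++ PySem.Str.join "" ps := by
  simp only [join_empty_cons, sappend_assoc]

-- a fold of inserts over a key list, looked up
theorem getD_insertfold (f : Int → List String) (ks : List Int) :
    ∀ (d : PySem.Dict Int (List String)) (n : Int),
      ((ks.foldl (fun d k => d.insert k (f k)) d).getD n []) =
        if n ∈ ks then f n else d.getD n [] := by
  induction ks with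
  | nil => intro d n; simp
  | cons k ks ih =>
      intro d n
      simp only [List.foldl_cons, ih, PySem.Dict.getD_insert, List.mem_cons]
      by_cases h1 : n ∈ ks <;> by_cases h2 : n = k <;> simp [h1, h2]

theorem mem_keys_insertfold (f : Int → List String) (ks : List Int) :
    ∀ (d : PySem.Dict Int (List String)) (n : Int),
      (n ∈ (ks.foldl (fun d k => d.insert k (f k)) d).keys) ↔ n ∈ ks ∨ n ∈ d.keys := by
  induction ks with
  | nil => intro d n; simp
  | cons k ks ih =>
      intro d n
      simp only [List.foldl_cons, ih, PySem.Dict.mem_keys_insert, List.mem_cons]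
      tauto

theorem subdivide_getD (wset : List String) (n : Int) :
    (subdivide wset).getD n [] =
      if 3 ≤ n ∧ n ≤ PySem.Str.len (wset.headD "")
      then wset.filter (fun w => PySem.Str.len w == n) else [] := by
  unfold subdivide
  rw [getD_insertfold]
  simp only [PySem.List.mem_pyRange_one]
  by_cases h : 3 ≤ n ∧ n < PySem.Str.len (wset.headD "") + 1
  · rw [if_pos h, if_pos ⟨h.1, by omega⟩]
  · rw [if_neg h, if_neg (by omega)]
    rfl

theorem max?_keys_insertfold (f : Int → List String) (m : Int) (h3 : 3 ≤ m) :
    PySem.List.max?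
        (((PySem.List.pyRange 3 (m + 1) 1).foldl
          (fun d k => d.insert k (f k)) PySem.Dict.empty).keys) (fun k => k) =
      some m := by
  have hmem : m ∈ ((PySem.List.pyRange 3 (m + 1) 1).foldl
      (fun d k => d.insert k (f k)) (PySem.Dict.empty : PySem.Dict Int (List String))).keys := by
    rw [mem_keys_insertfold]
    left; rw [PySem.List.mem_pyRange_one]; omega
  cases h : PySem.List.max?
      (((PySem.List.pyRange 3 (m + 1) 1).foldl
        (fun d k => d.insert k (f k)) (PySem.Dict.empty : PySem.Dict Int (List String))).keys)
      (fun k => k) with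
  | none =>
      rw [PySem.List.max?_eq_none_iff] at h
      rw [h] at hmem; simp at hmem
  | some k =>
      have hk := PySem.List.max?_mem h
      have hub := PySem.List.max?_isMax h _ hmem
      rw [mem_keys_insertfold] at hk
      have : k ≤ m := by
        rcases hk with hk | hk
        · rw [PySem.List.mem_pyRange_one] at hk; omega
        · simp [PySem.Dict.empty, PySem.Dict.keys] at hk
      simp only [Option.some.injEq]
      omega

theorem subdivide_max (wset : List String)
    (h3 : 3 ≤ PySem.Str.len (wset.headD "")) :
    PySem.List.max? (subdivide wset).keys (fun k => k) =
      some (PySem.Str.len (wset.headD "")) := by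
  unfold subdivide
  exact max?_keys_insertfold _ _ h3

theorem bucketsInit_max (wset : List String)
    (h3 : 3 ≤ PySem.Str.len (wset.headD "")) :
    PySem.List.max? (bucketsInit wset).keys (fun k => k) =
      some (PySem.Str.len (wset.headD "")) := by
  unfold bucketsInit
  exact max?_keys_insertfold _ _ h3

-- the single bucketing pass of B, looked up at a valid length
theorem getD_bucketfold (m : Int) (l : List String) :
    ∀ (d : PySem.Dict Int (List String)) (n : Int), 3 ≤ n → n ≤ m →
      ((l.foldl
          (fun d w =>
            if 3 ≤ PySem.Str.len w ∧ PySem.Str.len w ≤ m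
            then d.modify (PySem.Str.len w) [] (fun l => l ++ [w])
            else d) d).getD n []) =
        d.getD n [] ++ l.filter (fun w => PySem.Str.len w == n) := by
  induction l with
  | nil => intro d n _ _; simp
  | cons w l ih =>
      intro d n h3 hm
      by_cases hc : 3 ≤ PySem.Str.len w ∧ PySem.Str.len w ≤ m
      · rw [List.foldl_cons, if_pos hc, ih _ n h3 hm, PySem.Dict.getD_modify,
          List.filter_cons]
        by_cases he : n = PySem.Str.len w
        · have hb : (PySem.Str.len w == n) = true := by rw [beq_iff_eq]; omega
          rw [if_pos he, hb, ← he]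
          simp [List.append_assoc]
        · have hb : (PySem.Str.len w == n) = false := by
            rw [beq_eq_false_iff_ne]; omega
          rw [if_neg he, hb]
          simp
      · have hb : (PySem.Str.len w == n) = false := by
          rw [beq_eq_false_iff_ne]
          intro hh
          exact hc ⟨by omega, by omega⟩
        rw [List.foldl_cons, if_neg hc, ih _ n h3 hm, List.filter_cons, hb]
        simp

theorem wplAlt_pos (n : Int) (h3 : 3 ≤ n) (h47 : n ≤ 47) : 0 < wplAlt n := by
  interval_cases n <;> decide

-- A's delimiter computation equals the closed form wplAlt
theorem wpl_eq (n : Int) (h3 : 3 ≤ n) :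
    PySem.Int.floordiv 90
        (n + (if n < 8 then 8 - n
              else PySem.Int.floordiv n 8 * 8 - PySem.Int.mod n 8))
      + PySem.Int.floordiv (PySem.Int.mod 90 ((PySem.Int.floordiv n 8 + 1) * 8)) n
    = wplAlt n := by
  by_cases h8 : n < 8
  · have hd : PySem.Int.floordiv n 8 = 0 := by
      rw [PySem.Int.floordiv_eq_iff_of_pos (by omega)]; omega
    have h1 : n + (8 - n) = 8 := by ring
    have h2 : PySem.Int.mod 90 ((0 + 1) * 8) = 2 := by decide
    have h3' : PySem.Int.floordiv 2 n = 0 := by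
      rw [PySem.Int.floordiv_eq_iff_of_pos (by omega)]; omega
    simp only [wplAlt, if_pos h8, hd, h1, h2, h3']
    simp
  · have hmm := PySem.Int.floordiv_mul_add_mod n 8
    have h1 : n + (PySem.Int.floordiv n 8 * 8 - PySem.Int.mod n 8)
        = 16 * PySem.Int.floordiv n 8 := by omega
    have h2 : (PySem.Int.floordiv n 8 + 1) * 8 = 8 * (PySem.Int.floordiv n 8 + 1) := by ring
    simp only [wplAlt, if_neg h8, h1, h2]

theorem len_headD_filter (wset : List String) (n : Int)
    (hne : wset.filter (fun w => PySem.Str.len w == n) ≠ []) :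
    PySem.Str.len ((wset.filter (fun w => PySem.Str.len w == n)).headD "") = n := by
  cases hf : wset.filter (fun w => PySem.Str.len w == n) with
  | nil => exact absurd hf hne
  | cons a t =>
      have ha : a ∈ wset.filter (fun w => PySem.Str.len w == n) := by
        rw [hf]; exact List.mem_cons_self
      rw [List.mem_filter] at ha
      have := ha.2
      simp only [List.headD_cons]
      exact beq_iff_eq.mp this

theorem slice_min_eq (words : List String) (i W : Int)
    (h0 : 0 ≤ i) (hW : 0 < W) :
    PySem.List.slice words (some i) (some (min (i + W) (PySem.List.len words))) =
      PySem.List.slice words (some i) (some (i + W)) := by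
  rw [PySem.List.len_eq]
  by_cases h : i + W ≤ (words.length : Int)
  · rw [min_eq_left h]
  · rw [min_eq_right (by omega)]
    rw [PySem.List.slice_toNat _ h0 (by omega), PySem.List.slice_toNat _ h0 (by omega)]
    rw [List.take_of_length_le (by simp), List.take_of_length_le (by simp; omega)]

-- A's format_words, under the bucket invariant, as a join over the chunk starts
theorem format_words_eq (n : Int) (words : List String) (_hne : words ≠ [])
    (hlen : PySem.Str.len (words.headD "") = n) (h3 : 3 ≤ n) (h47 : n ≤ 47) :
    format_words words 90 =
      PySem.Str.join ""
        ((PySem.List.pyRange 0 (PySem.List.len words) (wplAlt n)).map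
          (fun i =>
            PySem.Str.join "\t" (PySem.List.slice words (some i) (some (i + wplAlt n))) ++ "\n")) := by
  have hW : 0 < wplAlt n := wplAlt_pos n h3 h47
  unfold format_words
  simp only [hlen, wpl_eq n h3]
  rw [PySem.List.foldl_congr_mem _ _
      (fun (o : String) (i : Int) =>
        o ++ (PySem.Str.join "\t"
          (PySem.List.slice words (some i) (some (i + wplAlt n))) ++ "\n")) _ ?_]
  · rw [foldl_strcat]
    rw [← String.toList_inj]; simp
  · intro acc i hi
    rw [PySem.List.mem_pyRange_iff_of_pos hW] at hi
    rw [slice_min_eq words i _ (by omega) hW, sappend_assoc]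

theorem bucketsAlt_getD (wset : List String) (n : Int)
    (h3 : 3 ≤ n) (hm : n ≤ PySem.Str.len (wset.headD "")) :
    (bucketsAlt wset).getD n [] = wset.filter (fun w => PySem.Str.len w == n) := by
  unfold bucketsAlt bucketsInit
  rw [getD_bucketfold _ _ _ n h3 hm, getD_insertfold]
  split <;> simp

-- ===== VERDICT (by name: the statement is the Claim_ definition above) =====
set_option maxHeartbeats 1000000 in
theorem format_wordset_spec : Claim_equal_format_wordset := by
  intro wset _ hpre
  obtain ⟨hne, h3, h47, hall⟩ := hpre
  unfold Spec_format_wordset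
  simp only [format_wordset, format_wordset_alt]
  rw [subdivide_max wset h3, bucketsInit_max wset h3]
  simp only [Option.getD_some]
  -- normalize A's fold of string appends
  conv_lhs =>
    rw [PySem.List.foldl_congr_mem _ _
        (fun (o : String) (n : Int) =>
          o ++ (("\n" ++ (PySem.Int.toStr n ++ "-letter words (" ++
              PySem.Int.toStr (PySem.List.len ((subdivide wset).getD n [])) ++ "):\n")) ++
            format_words ((subdivide wset).getD n []) 90)) _
        (by intro acc n _; simp only [sappend_assoc])]
    rw [foldl_strcat]
  -- normalize B's parts fold: each iteration appends a header and the chunk parts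
  conv_rhs =>
    rw [PySem.List.foldl_congr_mem _ _
        (fun (parts : List String) (n : Int) =>
          parts ++
            (("\n" ++ PySem.Int.toStr n ++ "-letter words (" ++
                PySem.Int.toStr (PySem.List.len ((bucketsAlt wset).getD n [])) ++ "):\n") ::
              (PySem.List.pyRange 0 (PySem.List.len ((bucketsAlt wset).getD n []))
                  (wplAlt n)).flatMap
                (fun i =>
                  [PySem.Str.join "\t"
                      (PySem.List.slice ((bucketsAlt wset).getD n []) (some i)
                        (some (i + wplAlt n))),
                    "\n"]))) _
        (by
          intro acc n _
          rw [PySem.List.foldl_congr_mem _ _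
              (fun (parts : List String) (i : Int) =>
                parts ++
                  [PySem.Str.join "\t"
                      (PySem.List.slice ((bucketsAlt wset).getD n []) (some i)
                        (some (i + wplAlt n))),
                    "\n"]) _ (by intro acc' i _; rw [List.append_assoc]; rfl)]
          rw [PySem.List.foldl_append_eq_flatMap]
          rw [List.append_assoc]
          rfl)]
    rw [PySem.List.foldl_append_eq_flatMap, List.nil_append, join_empty_flatMap]
  rw [← String.toList_inj]; simp only [String.toList_append, String.toList_empty,
    List.nil_append]
  rw [String.toList_inj]
  congr 1
  apply List.map_congr_left
  intro n hn
  rw [PySem.List.mem_pyRange_one] at hn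
  have hn3 : 3 ≤ n := hn.1
  have hnm : n ≤ PySem.Str.len (wset.headD "") := by omega
  have hbA : (subdivide wset).getD n [] = wset.filter (fun w => PySem.Str.len w == n) := by
    rw [subdivide_getD, if_pos ⟨hn3, hnm⟩]
  have hbB := bucketsAlt_getD wset n hn3 hnm
  have hbne : wset.filter (fun w => PySem.Str.len w == n) ≠ [] := by
    obtain ⟨w, hw, hwl⟩ := hall n (by rw [PySem.List.mem_pyRange_one]; omega)
    intro hnil
    have : w ∈ wset.filter (fun w => PySem.Str.len w == n) := by
      rw [List.mem_filter]
      exact ⟨hw, by rw [beq_iff_eq]; exact hwl⟩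
    rw [hnil] at this; simp at this
  rw [hbA, hbB]
  rw [format_words_eq n _ hbne (len_headD_filter wset n hbne) hn3 (by omega)]
  rw [join_empty_cons, join_empty_flatMap]
  have hmap :
      List.map
          (fun i => PySem.Str.join ""
            [PySem.Str.join "\t"
                (PySem.List.slice (List.filter (fun w => PySem.Str.len w == n) wset) (some i)
                  (some (i + wplAlt n))),
              "\n"])
          (PySem.List.pyRange 0
            (PySem.List.len (List.filter (fun w => PySem.Str.len w == n) wset)) (wplAlt n)) =
        List.map
          (fun i =>
            PySem.Str.join "\t"
                (PySem.List.slice (List.filter (fun w => PySem.Str.len w == n) wset) (some i)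
                  (some (i + wplAlt n))) ++
              "\n")
          (PySem.List.pyRange 0
            (PySem.List.len (List.filter (fun w => PySem.Str.len w == n) wset)) (wplAlt n)) := by
    apply List.map_congr_left
    intro i _
    rw [join_empty_pair_cons, join_empty_nil]
    rw [← String.toList_inj]; simp
  rw [hmap]
  rw [← String.toList_inj]; simp [List.append_assoc]


theorem format_wordset_raises : Claim_raises_format_wordset := by
  unfold Claim_raises_format_wordset
  constructor
  · intro wset _ hr hp
    obtain ⟨hne, hr3, hle, n, hmem, hnone⟩ := hr
    obtain ⟨_, hp3, _, hall⟩ := hp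
    obtain ⟨w, hw, hwl⟩ := hall n hmem
    exact hnone w hw hwl
  · exact ⟨by decide, by decide, by decide⟩

-- self-check: the raise witness really lies in the certified crash-fix region and B's
-- port returns the stated literal there (projections of format_wordset_raises)
theorem format_wordset_raises_ok :
    Raises_format_wordset pvRaiseWitness_format_wordset ∧
      format_wordset_alt pvRaiseWitness_format_wordset = pvRaiseWitnessOut_format_wordset :=
  ⟨format_wordset_raises.2.2.1, format_wordset_raises.2.2.2⟩
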